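-- pv_equiv track=rewrite | github.com/novice-hero/SWEA | 1209 - Sum.py | diaSumMax
-- ===== SOURCE A (Python) =====
-- def diaSumMax(arr):
--   tempList = [0,0]
--   for i in range(len(arr)):
--     for j in range(len(arr)):
--       if i==j:
--         tempList[0] += arr[i][j]
--   for i in range(len(arr)-1, -1, -1):
--     for j in range(len(arr)):
--       if i==j:
--         tempList[1] += arr[i][j]
--   return max(tempList)
-- ===== SOURCE B (Python) =====
-- def diaSumMax(arr):
--   # One pass: both of A's accumulators hold the main-diagonal sum (both loops
--   # test i==j), so the result is just sum(arr[i][i]).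
--   return sum(row[i] for i, row in enumerate(arr))
-- ===== Notes on version B (the rewrite author's own statement) =====
-- stated objective: faster
-- what changed: Replaced the two O(n^2) nested index loops and the max over two accumulators by a single enumerate pass summing row[i]: A's second loop also tests i==j, so both accumulators equal the main-diagonal sum and the max is that sum.
import Mathlib
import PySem

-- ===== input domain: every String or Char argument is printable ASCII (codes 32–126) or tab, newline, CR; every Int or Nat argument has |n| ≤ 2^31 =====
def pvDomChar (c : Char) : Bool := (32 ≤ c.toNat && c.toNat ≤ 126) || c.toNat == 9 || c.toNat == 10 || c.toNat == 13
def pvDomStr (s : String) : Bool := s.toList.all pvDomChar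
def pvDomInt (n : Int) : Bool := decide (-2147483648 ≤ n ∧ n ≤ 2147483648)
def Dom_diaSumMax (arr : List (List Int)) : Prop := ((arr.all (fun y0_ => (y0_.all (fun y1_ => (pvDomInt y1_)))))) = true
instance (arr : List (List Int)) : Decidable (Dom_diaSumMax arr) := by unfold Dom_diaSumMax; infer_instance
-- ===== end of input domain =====

-- B replaces A's two O(n^2) nested index loops (whose accumulators both hold the
-- main-diagonal sum, since both loops test i==j) and the final max by one
-- enumerate pass summing row[i]; a timing run measures the speed-up.

-- ===== PORT A =====
def diaSumMax (arr : List (List Int)) : Int :=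
  max
    ((PySem.List.pyRange 0 (arr.length : Int) 1).foldl (fun acc i =>
      (PySem.List.pyRange 0 (arr.length : Int) 1).foldl (fun acc2 j =>
        if i = j then acc2 + PySem.List.pyGetD (PySem.List.pyGetD arr i []) j 0 else acc2) acc) 0)
    ((PySem.List.pyRange ((arr.length : Int) - 1) (-1) (-1)).foldl (fun acc i =>
      (PySem.List.pyRange 0 (arr.length : Int) 1).foldl (fun acc2 j =>
        if i = j then acc2 + PySem.List.pyGetD (PySem.List.pyGetD arr i []) j 0 else acc2) acc) 0)

-- ===== PORT B =====
def diaSumMax_alt (arr : List (List Int)) : Int :=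
  ((PySem.List.enumerate arr).map (fun p => PySem.List.pyGetD p.2 p.1 0)).sum

-- ===== PRECONDITION & SPEC =====
-- Pre_ excludes exactly the ragged inputs on which arr[i][i] raises IndexError
-- in A (and row[i] raises the same in B): some row i has length ≤ i.
def Pre_diaSumMax (arr : List (List Int)) : Prop :=
  ∀ i : Nat, i < arr.length → i < (arr.getD i []).length
instance (arr : List (List Int)) : Decidable (Pre_diaSumMax arr) := by
  unfold Pre_diaSumMax; infer_instance
def pvWitness_diaSumMax : List (List Int) := [[1, 2], [3, 4]]

def Spec_diaSumMax (arr : List (List Int)) (out : Int) : Prop := out = diaSumMax_alt arr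
instance (arr : List (List Int)) (out : Int) : Decidable (Spec_diaSumMax arr out) := by unfold Spec_diaSumMax; infer_instance

-- ===== CLAIM (what is proved, stated in full; the proofs are below) =====
def Claim_equal_diaSumMax : Prop := ∀ (arr : List (List Int)), Dom_diaSumMax arr → Pre_diaSumMax arr → Spec_diaSumMax arr (diaSumMax arr)

-- ===== LEMMAS AND PROOFS =====

-- inner 'for j' loop of A: adds v once for each occurrence of i among the j's
theorem foldl_if_eq_count (l : List Int) (i : Int) (g : Int → Int) (acc : Int) :
    l.foldl (fun a j => if i = j then a + g j else a) acc = acc + (l.count i) * g i := by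
  induction l generalizing acc with
  | nil => simp
  | cons x t ih =>
    by_cases h : i = x
    · subst h; simp [List.foldl_cons, ih]; ring
    · simp [List.foldl_cons, if_neg h, ih, Ne.symm h]

theorem count_pyRange_one_of_mem (a b i : Int) (h : i ∈ PySem.List.pyRange a b 1) :
    (PySem.List.pyRange a b 1).count i = 1 :=
  List.count_eq_one_of_mem (PySem.List.nodup_pyRange_one a b) h

-- either of A's outer loops equals the sum of the diagonal picks over its range
theorem outer_loop_eq_sum (arr : List (List Int)) (l : List Int)
    (hsub : ∀ i ∈ l, (PySem.List.pyRange 0 (arr.length : Int) 1).count i = 1) :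
    l.foldl (fun acc i =>
      (PySem.List.pyRange 0 (arr.length : Int) 1).foldl (fun acc2 j =>
        if i = j then acc2 + PySem.List.pyGetD (PySem.List.pyGetD arr i []) j 0 else acc2) acc) 0
    = (l.map (fun i => PySem.List.pyGetD (PySem.List.pyGetD arr i []) i 0)).sum := by
  have h1 := PySem.List.foldl_congr_mem'
    (l := l) (init := (0 : Int))
    (f := fun acc i =>
      (PySem.List.pyRange 0 (arr.length : Int) 1).foldl (fun acc2 j =>
        if i = j then acc2 + PySem.List.pyGetD (PySem.List.pyGetD arr i []) j 0 else acc2) acc)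
    (g := fun acc i => acc + PySem.List.pyGetD (PySem.List.pyGetD arr i []) i 0)
    (by
      intro i hi acc
      beta_reduce
      rw [foldl_if_eq_count, hsub i hi]; simp)
  rw [h1, PySem.List.foldl_add, zero_add]

theorem B_enum_sum (xs : List (List Int)) (s : Int) :
    ((PySem.List.enumerate xs s).map (fun p => PySem.List.pyGetD p.2 p.1 0)).sum
    = ((List.range xs.length).map (fun k => PySem.List.pyGetD (xs.getD k []) (s + k) 0)).sum := by
  induction xs generalizing s with
  | nil => simp [PySem.List.enumerate_nil]
  | cons r t ih =>
    rw [PySem.List.enumerate_cons]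
    simp only [List.map_cons, List.sum_cons, List.length_cons, List.range_succ_eq_map,
      List.map_map, ih (s + 1)]
    congr 1
    · simp
    · congr 1
      apply List.map_congr_left
      intro k _
      simp [Function.comp]
      ring_nf

-- ===== VERDICT (by name: the statement is the Claim_ definition above) =====
theorem diaSumMax_spec : Claim_equal_diaSumMax := by
  intro arr _ _
  unfold Spec_diaSumMax diaSumMax diaSumMax_alt
  have hcnt : ∀ i ∈ PySem.List.pyRange 0 (arr.length : Int) 1,
      (PySem.List.pyRange 0 (arr.length : Int) 1).count i = 1 := by
    intro i hi; exact count_pyRange_one_of_mem _ _ _ hi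
  have hrev : PySem.List.pyRange ((arr.length : Int) - 1) (-1) (-1)
      = (PySem.List.pyRange 0 (arr.length : Int) 1).reverse := by
    have := PySem.List.pyRange_neg_one_eq_reverse ((arr.length : Int) - 1) (-1)
    simpa using this
  have hsubrev : ∀ i ∈ (PySem.List.pyRange 0 (arr.length : Int) 1).reverse,
      (PySem.List.pyRange 0 (arr.length : Int) 1).count i = 1 := by
    intro i hi; exact count_pyRange_one_of_mem _ _ _ (List.mem_reverse.mp hi)
  have h0 := outer_loop_eq_sum arr (PySem.List.pyRange 0 (arr.length : Int) 1) hcnt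
  have h1 := outer_loop_eq_sum arr ((PySem.List.pyRange 0 (arr.length : Int) 1).reverse) hsubrev
  rw [hrev, h0, h1, List.map_reverse, List.sum_reverse, max_self]
  -- both sides are now the diagonal sum; identify with B's enumerate pass
  rw [B_enum_sum arr 0, PySem.List.pyRange_one]
  simp only [sub_zero, Int.toNat_natCast, List.map_map]
  apply congrArg List.sum
  apply List.map_congr_left
  intro k _
  simp [Function.comp]
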